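-- pv_equiv track=rewrite | github.com/ManuelLoaizaV/ine018-unmsm | tareas/2/24190315/ejercicio_17/ejercicio_17.py | convertir_a_buena
-- ===== SOURCE A (Python) =====
-- from collections import deque
--
-- def convertir_a_buena(s):
--     caracteres = deque()
--     for c in s:
--         if caracteres and caracteres[-1].islower() and caracteres[-1].upper() == c:
--             caracteres.pop()
--         else:
--             caracteres.append(c)
--     return ''.join(caracteres)
-- ===== SOURCE B (Python) =====
-- def _one_pass(s):
--     out = []
--     i = 0
--     while i < len(s):
--         if i + 1 < len(s) and s[i].islower() and s[i].upper() == s[i + 1]: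
--             i += 2
--         else:
--             out.append(s[i])
--             i += 1
--     return ''.join(out)
--
--
-- def convertir_a_buena(s):
--     # Iterative global reduction: apply the skip-adjacent-pair pass until the
--     # string stabilises; the fixed point equals the stack normal form.
--     while True:
--         t = _one_pass(s)
--         if t == s:
--             return s
--         s = t
-- ===== Notes on version B (the rewrite author's own statement) =====
-- stated objective: alternative
-- what changed: Replaces A's single stack pass with an iterative global reduction: repeatedly sweep the string left to right removing every lowercase char immediately followed by its own uppercase counterpart, until a sweep changes nothing; the fixed point equals the stack normal form.
import Mathlib
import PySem

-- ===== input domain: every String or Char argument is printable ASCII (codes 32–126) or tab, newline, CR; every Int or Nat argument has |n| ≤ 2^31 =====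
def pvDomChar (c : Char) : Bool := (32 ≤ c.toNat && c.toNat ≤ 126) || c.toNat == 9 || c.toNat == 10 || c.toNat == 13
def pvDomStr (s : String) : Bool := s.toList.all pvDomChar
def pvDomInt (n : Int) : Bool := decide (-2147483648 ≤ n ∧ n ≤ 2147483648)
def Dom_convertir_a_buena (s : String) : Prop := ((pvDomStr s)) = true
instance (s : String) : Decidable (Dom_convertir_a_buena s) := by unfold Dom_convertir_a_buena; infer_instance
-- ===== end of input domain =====

-- B replaces A's single stack pass by repeated skip-adjacent-pair sweeps to a fixed point
-- (objective: alternative pass shape, not faster).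

-- ===== PORT A =====
-- one step of A's loop body: pop when the stack top is a lowercase letter whose
-- uppercase form equals c (caracteres[-1].islower() and caracteres[-1].upper() == c;
-- on a one-char ASCII string Python's str.islower/str.upper are the char-level
-- PySem.Chars.islower/upperChar), else append c
def pvStepA (st : List Char) (c : Char) : List Char :=
  match st.getLast? with
  | some t =>
    if PySem.Chars.islower t && (PySem.Chars.upperChar t == c)
    then st.dropLast else st ++ [c]
  | none => st ++ [c]

def convertir_a_buena (s : String) : String :=
  String.mk (s.toList.foldl pvStepA [])

-- ===== PORT B =====
-- _one_pass: scan left to right; skip a lowercase char together with the immediately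
-- following char when that is its own uppercase counterpart, else copy the char
def pvOnePass : List Char → List Char
  | [] => []
  | [c] => [c]
  | a :: b :: rest =>
    if PySem.Chars.islower a && (PySem.Chars.upperChar a == b)
    then pvOnePass rest
    else a :: pvOnePass (b :: rest)

lemma pvOnePass_length_le (l : List Char) : (pvOnePass l).length ≤ l.length := by
  fun_induction pvOnePass <;> simp_all
  omega

lemma pvOnePass_eq_of_length (l : List Char) (h : (pvOnePass l).length = l.length) :
    pvOnePass l = l := by
  fun_induction pvOnePass with
  | case1 => rfl
  | case2 c => rfl
  | case3 a b rest hp ih =>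
    exfalso
    have hle := pvOnePass_length_le rest
    have h2 : (pvOnePass rest).length = rest.length + 2 := by simpa using h
    omega
  | case4 a b rest hp ih =>
    simp only [List.length_cons] at h
    rw [ih (by simp only [List.length_cons]; omega)]

lemma pvOnePass_length_lt (l : List Char) (h : pvOnePass l ≠ l) :
    (pvOnePass l).length < l.length := by
  rcases Nat.lt_or_eq_of_le (pvOnePass_length_le l) with hlt | heq
  · exact hlt
  · exact absurd (pvOnePass_eq_of_length l heq) h

-- the `while True` loop of B: repeat the pass until it no longer changes the string
def pvFixPass (l : List Char) : List Char :=
  let t := pvOnePass l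
  if h : t = l then l else pvFixPass t
termination_by l.length
decreasing_by exact pvOnePass_length_lt l h

def convertir_a_buena_alt (s : String) : String :=
  String.mk (pvFixPass s.toList)

-- ===== PRECONDITION & SPEC =====
def Spec_convertir_a_buena (s : String) (out : String) : Prop := out = convertir_a_buena_alt s
instance (s : String) (out : String) : Decidable (Spec_convertir_a_buena s out) := by unfold Spec_convertir_a_buena; infer_instance

-- ===== CLAIM (what is proved, stated in full; the proofs are below) =====
def Claim_equal_convertir_a_buena : Prop := ∀ (s : String), Dom_convertir_a_buena s → Spec_convertir_a_buena s (convertir_a_buena s)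

-- ===== LEMMAS AND PROOFS =====

lemma char_ofNat_toNat (n : Nat) (h : n < 55296) : (Char.ofNat n).toNat = n := by
  unfold Char.ofNat Char.toNat
  split
  · simp
  · rename_i hn
    exfalso; apply hn
    unfold Nat.isValidChar
    left; exact h

lemma char_toNat_bounds (c : Char) (h : PySem.Chars.islower c = true) :
    97 ≤ c.toNat ∧ c.toNat ≤ 122 := by
  simp only [PySem.Chars.islower, Bool.and_eq_true, decide_eq_true_eq, Char.le_def,
    UInt32.le_iff_toNat_le] at h
  exact h

-- the uppercase counterpart of a lowercase letter is never itself lowercase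
lemma islower_upper_false (c : Char) (h : PySem.Chars.islower c = true) :
    PySem.Chars.islower (PySem.Chars.upperChar c) = false := by
  obtain ⟨h1, h2⟩ := char_toNat_bounds c h
  have ht : (Char.ofNat (c.toNat - 32)).toNat = c.toNat - 32 :=
    char_ofNat_toNat _ (by omega)
  simp only [PySem.Chars.upperChar, h, if_true]
  simp only [PySem.Chars.islower, Bool.and_eq_false_iff, decide_eq_false_iff_not, Char.le_def,
    UInt32.le_iff_toNat_le]
  left
  show ¬ ('a'.toNat ≤ (Char.ofNat (c.toNat - 32)).toNat)
  have ha : 'a'.toNat = 97 := rfl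
  rw [ha, ht]; omega

-- consuming an adjacent pair commutes with A's stack: pushing a then its uppercase pops a
lemma foldl_step_pair (st : List Char) (a b : Char) (rest : List Char)
    (hp : (PySem.Chars.islower a && (PySem.Chars.upperChar a == b)) = true) :
    List.foldl pvStepA st (a :: b :: rest) = List.foldl pvStepA st rest := by
  simp only [Bool.and_eq_true, beq_iff_eq] at hp
  obtain ⟨hla, hub⟩ := hp
  have hstep : pvStepA st a = st ++ [a] := by
    unfold pvStepA
    cases hlast : st.getLast? with
    | none => rfl
    | some t =>
      by_cases hpt : (PySem.Chars.islower t && (PySem.Chars.upperChar t == a)) = true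
      · exfalso
        simp only [Bool.and_eq_true, beq_iff_eq] at hpt
        obtain ⟨hlt, hut⟩ := hpt
        have := islower_upper_false t hlt
        rw [hut, hla] at this
        exact absurd this (by simp)
      · simp [hpt]
  have hstep2 : pvStepA (st ++ [a]) b = st := by
    unfold pvStepA
    simp [hla, hub]
  simp only [List.foldl_cons, hstep, hstep2]

-- L1: one B-pass does not change A's stack result (any starting stack)
lemma foldl_onePass (l : List Char) : ∀ st : List Char,
    List.foldl pvStepA st (pvOnePass l) = List.foldl pvStepA st l := by
  fun_induction pvOnePass with
  | case1 => intro st; rfl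
  | case2 c => intro st; rfl
  | case3 a b rest hp ih =>
    intro st
    rw [ih st, foldl_step_pair st a b rest hp]
  | case4 a b rest hp ih =>
    intro st
    simp only [List.foldl_cons]
    exact ih (pvStepA st a)

-- a fixed point of the pass has no adjacent pair, so A's stack copies it verbatim
lemma foldl_of_fixed (l : List Char) : ∀ st : List Char,
    pvOnePass l = l →
    (∀ t, st.getLast? = some t → ∀ b, l.head? = some b →
      (PySem.Chars.islower t && (PySem.Chars.upperChar t == b)) = false) →
    List.foldl pvStepA st l = st ++ l := by
  induction l with
  | nil => intro st _ _; simp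
  | cons c rest ih =>
    intro st hfix hbd
    have hstep : pvStepA st c = st ++ [c] := by
      unfold pvStepA
      cases hlast : st.getLast? with
      | none => rfl
      | some t =>
        have := hbd t hlast c (by rfl)
        simp [this]
    have hfixrest : pvOnePass rest = rest := by
      cases rest with
      | nil => rfl
      | cons b r2 =>
        by_cases hp : (PySem.Chars.islower c && (PySem.Chars.upperChar c == b)) = true
        · exfalso
          have hlen := pvOnePass_length_le r2
          simp only [pvOnePass, hp, if_true] at hfix
          have : (pvOnePass r2).length = (c :: b :: r2).length := by rw [hfix]
          simp at this; omega
        · simp only [pvOnePass] at hfix ⊢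
          rw [Bool.not_eq_true] at hp
          simp only [hp, Bool.false_eq_true, if_false, List.cons.injEq] at hfix
          exact hfix.2
    have hbd2 : ∀ t, (st ++ [c]).getLast? = some t → ∀ b, rest.head? = some b →
        (PySem.Chars.islower t && (PySem.Chars.upperChar t == b)) = false := by
      intro t hlast b hhead
      rw [List.getLast?_concat] at hlast
      simp only [Option.some.injEq] at hlast
      cases rest with
      | nil => simp at hhead
      | cons b0 r2 =>
        simp only [List.head?_cons, Option.some.injEq] at hhead
        rw [← hlast, ← hhead]
        by_cases hp : (PySem.Chars.islower c && (PySem.Chars.upperChar c == b0)) = true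
        · exfalso
          have hlen := pvOnePass_length_le r2
          simp only [pvOnePass, hp, if_true] at hfix
          have hx : (pvOnePass r2).length = (c :: b0 :: r2).length := by rw [hfix]
          simp only [List.length_cons] at hx
          omega
        · exact Bool.not_eq_true _ |>.mp hp
    calc List.foldl pvStepA st (c :: rest)
        = List.foldl pvStepA (st ++ [c]) rest := by simp [hstep]
      _ = (st ++ [c]) ++ rest := ih (st ++ [c]) hfixrest hbd2
      _ = st ++ (c :: rest) := by simp

-- main: A's stack result equals B's fixed point
lemma stack_eq_fix (l : List Char) : List.foldl pvStepA [] l = pvFixPass l := by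
  fun_induction pvFixPass with
  | case1 l t hfix =>
    exact foldl_of_fixed l [] hfix (by intro t h; simp at h)
  | case2 l t hne ih =>
    rw [← foldl_onePass l []]
    exact ih

-- ===== VERDICT (by name: the statement is the Claim_ definition above) =====
theorem convertir_a_buena_spec : Claim_equal_convertir_a_buena := by
  intro s _
  unfold Spec_convertir_a_buena convertir_a_buena convertir_a_buena_alt
  rw [stack_eq_fix]
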